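-- pv_equiv track=rewrite | github.com/dcmetiner/mle_bomberman | bomberman_mle/agent_code/q_learning_agent_360/q_utilities.py | get_actual_move_before_rotation
-- ===== SOURCE A (Python) =====
-- def canonicalize_neighbours(neighbour_tiles):
--     """Normalize the neighbor tiles to account for symmetrical/mirrored states."""
--     # Mirror horizontally and vertically (rotating could also be used)
--     smallest_neighbour_tiles_representation = neighbour_tiles
--     neighbour_tiles_to_rotate = neighbour_tiles
--     rotate_times = 0
--     for rotation_cnt in range(1, 4):
--         neighbour_tiles_to_rotate = neighbour_tiles_to_rotate[1:4] + neighbour_tiles_to_rotate[0:1]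
--         if smallest_neighbour_tiles_representation > neighbour_tiles_to_rotate:
--             smallest_neighbour_tiles_representation = neighbour_tiles_to_rotate
--             rotate_times = rotation_cnt
--     # Return the lexicographically smallest state
--     return smallest_neighbour_tiles_representation, rotate_times
--
-- ACTION_ROTATION_BACKWARD = {'UP': 'LEFT', 'LEFT': 'DOWN', 'DOWN': 'RIGHT', 'RIGHT': 'UP'}
--
-- def get_actual_move_before_rotation(feature_vector, action):
--     if action in ['BOMB', 'WAIT']:
--         return action
--     neighbour_tiles = tuple(feature_vector[:4])
--     _, rotation_count = canonicalize_neighbours(neighbour_tiles)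
--     for _ in range(rotation_count):
--         action = ACTION_ROTATION_BACKWARD[action]
--     return action
-- ===== SOURCE B (Python) =====
-- # B: recovers the rotation count by radix-style candidate refinement (keep all
-- # candidate start indices, filter depth by depth on the element at that depth)
-- # instead of A's rotate-and-compare loop, then undoes the rotation with one
-- # modular shift along the action cycle; objective: alternative.
-- ACTIONS_CYCLE = ['UP', 'LEFT', 'DOWN', 'RIGHT']
--
-- def get_actual_move_before_rotation(feature_vector, action):
--     if action in ('BOMB', 'WAIT'):
--         return action
--     if action not in ACTIONS_CYCLE:
--         return action
--     t = list(feature_vector[:4])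
--     n = len(t)
--     # candidate start indices of the lexicographically smallest rotation,
--     # refined one depth at a time; the first survivor is the rotation count
--     cand = list(range(n))
--     for depth in range(n):
--         if len(cand) <= 1:
--             break
--         best = min(t[(c + depth) % n] for c in cand)
--         cand = [c for c in cand if t[(c + depth) % n] == best]
--     r = cand[0] if cand else 0
--     return ACTIONS_CYCLE[(ACTIONS_CYCLE.index(action) + r) % 4]
-- ===== Notes on version B (the rewrite author's own statement) =====
-- stated objective: alternative
-- what changed: Replaces A's rotate-and-compare loop (materialize each rotation, keep the running lexicographic minimum) and iterated backward-dict lookups by a radix-style candidate refinement: keep the set of candidate start indices and filter it depth by depth on the single element at that depth, then undo the rotation with one modular shift along the action cycle.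
import Mathlib
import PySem

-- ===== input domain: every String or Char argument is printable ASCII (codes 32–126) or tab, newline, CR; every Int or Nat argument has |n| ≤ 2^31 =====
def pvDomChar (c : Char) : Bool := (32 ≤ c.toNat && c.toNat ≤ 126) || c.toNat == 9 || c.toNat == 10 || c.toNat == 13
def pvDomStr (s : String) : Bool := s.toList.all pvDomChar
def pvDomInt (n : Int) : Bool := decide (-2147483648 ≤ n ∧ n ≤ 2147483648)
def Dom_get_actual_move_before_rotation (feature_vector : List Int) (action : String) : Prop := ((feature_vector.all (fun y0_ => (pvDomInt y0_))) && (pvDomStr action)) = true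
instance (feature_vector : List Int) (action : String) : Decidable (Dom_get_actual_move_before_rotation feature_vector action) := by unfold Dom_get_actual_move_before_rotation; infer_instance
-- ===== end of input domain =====

set_option maxRecDepth 10000
set_option maxHeartbeats 2000000


-- B recovers the rotation count by radix-style candidate refinement (filter the
-- candidate start indices depth by depth) instead of A's rotate-and-compare
-- loop, and undoes the rotation with one modular shift along the action cycle;
-- objective: alternative.

-- Python's `<` on tuples of ints (comparison helper of the A port)
def pyTupLt : List Int → List Int → Bool
  | _, [] => false
  | [], _ :: _ => true
  | a :: as, b :: bs => a < b || (a == b && pyTupLt as bs)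

-- ===== PORT A =====
def canonicalize_neighbours (neighbour_tiles : List Int) : List Int × Int :=
  let r := (PySem.List.pyRange 1 4 1).foldl
    (fun (st : List Int × List Int × Int) rotation_cnt =>
      let rotated := PySem.List.slice st.2.1 (some 1) (some 4) ++ PySem.List.slice st.2.1 (some 0) (some 1)
      if pyTupLt rotated st.1 then (rotated, rotated, rotation_cnt) else (st.1, rotated, st.2.2))
    (neighbour_tiles, neighbour_tiles, (0 : Int))
  (r.1, r.2.2)

-- ACTION_ROTATION_BACKWARD[a]; on a key outside the dict Python raises KeyError
-- (those inputs are excluded by Pre_); here the lookup falls back to `a` itself.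
def pvBackward (a : String) : String :=
  if a = "UP" then "LEFT" else if a = "LEFT" then "DOWN"
  else if a = "DOWN" then "RIGHT" else if a = "RIGHT" then "UP" else a

def get_actual_move_before_rotation (feature_vector : List Int) (action : String) : String :=
  if action = "BOMB" || action = "WAIT" then action
  else
    let neighbour_tiles := PySem.List.slice feature_vector none (some 4)
    let rotation_count := (canonicalize_neighbours neighbour_tiles).2
    (PySem.List.pyRange 0 rotation_count 1).foldl (fun a _ => pvBackward a) action

-- ===== PORT B =====
def pvActionsCycle : List String := ["UP", "LEFT", "DOWN", "RIGHT"]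

-- Python's min over a nonempty list of ints (the generator in Source B), ported by hand
def pyIntMin (xs : List Int) : Int :=
  match xs with
  | [] => 0
  | h :: t => t.foldl (fun m x => if x < m then x else m) h

-- the candidate-refinement loop of Source B: start indices of the lexicographically
-- smallest rotation, filtered one depth at a time; first survivor = rotation count.
-- Python's `break` once ≤ 1 candidate remains is the identity guard here; the
-- index (c + depth) % n is always in range, so getD 0 is exact.
def bRot (t : List Int) : Nat :=
  let n := t.length
  let cand := (List.range n).foldl
    (fun cand depth =>
      if cand.length ≤ 1 then cand
      else
        let best := pyIntMin (cand.map (fun c => t.getD ((c + depth) % n) 0))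
        cand.filter (fun c => t.getD ((c + depth) % n) 0 == best))
    (List.range n)
  cand.headD 0

def get_actual_move_before_rotation_alt (feature_vector : List Int) (action : String) : String :=
  if action = "BOMB" || action = "WAIT" then action
  else if !(pvActionsCycle.contains action) then action
  else
    let t := PySem.List.slice feature_vector none (some 4)
    let r := bRot t
    pvActionsCycle.getD (((PySem.List.index? pvActionsCycle action).getD 0 + r) % 4) ""

-- ===== PRECONDITION & SPEC =====
-- Pre_ excludes exactly the inputs on which A raises KeyError: an action outside
-- the six known actions together with a feature prefix that is NOT already its own
-- lexicographically minimal rotation (so A's loop body runs and looks the action up).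
def Pre_get_actual_move_before_rotation (feature_vector : List Int) (action : String) : Prop :=
  action ∈ ["UP", "DOWN", "LEFT", "RIGHT", "BOMB", "WAIT"] ∨
  (∀ i ∈ ([1, 2, 3] : List Nat),
    ¬ List.Lex (· < ·) ((PySem.List.slice feature_vector none (some 4)).drop i ++ (PySem.List.slice feature_vector none (some 4)).take i)
      (PySem.List.slice feature_vector none (some 4)))
instance (feature_vector : List Int) (action : String) : Decidable (Pre_get_actual_move_before_rotation feature_vector action) := by unfold Pre_get_actual_move_before_rotation; infer_instance

def pvWitness_get_actual_move_before_rotation : List Int × String := ([1, 0, 2, 3], "UP")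

def Spec_get_actual_move_before_rotation (feature_vector : List Int) (action : String) (out : String) : Prop := out = get_actual_move_before_rotation_alt feature_vector action
instance (feature_vector : List Int) (action : String) (out : String) : Decidable (Spec_get_actual_move_before_rotation feature_vector action out) := by unfold Spec_get_actual_move_before_rotation; infer_instance

-- ===== CLAIM (what is proved, stated in full; the proofs are below) =====
def Claim_equal_get_actual_move_before_rotation : Prop := ∀ (feature_vector : List Int) (action : String), Dom_get_actual_move_before_rotation feature_vector action → Pre_get_actual_move_before_rotation feature_vector action → Spec_get_actual_move_before_rotation feature_vector action (get_actual_move_before_rotation feature_vector action)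

-- ===== LEMMAS AND PROOFS =====

-- ---- generic facts about order-preserving relabelings -------------------------
-- hf says: f preserves < between elements of t (hence also = and ==).

lemma ordpres_eq_iff {t : List Int} {f : Int → Int}
    (hf : ∀ x ∈ t, ∀ y ∈ t, (f x < f y ↔ x < y)) {x y : Int}
    (hx : x ∈ t) (hy : y ∈ t) : f x = f y ↔ x = y := by
  have h1 := hf x hx y hy
  have h2 := hf y hy x hx
  constructor
  · intro h; have := h1.mp; have := h2.mp; omega
  · intro h; subst h; rfl

lemma ordpres_beq {t : List Int} {f : Int → Int}
    (hf : ∀ x ∈ t, ∀ y ∈ t, (f x < f y ↔ x < y)) {x y : Int}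
    (hx : x ∈ t) (hy : y ∈ t) : (f x == f y) = (x == y) := by
  have h := ordpres_eq_iff hf hx hy
  by_cases hxy : x = y
  · subst hxy; simp
  · have : f x ≠ f y := fun he => hxy (h.mp he)
    simp [hxy, this]

lemma ordpres_declt {t : List Int} {f : Int → Int}
    (hf : ∀ x ∈ t, ∀ y ∈ t, (f x < f y ↔ x < y)) {x y : Int}
    (hx : x ∈ t) (hy : y ∈ t) : (decide (f x < f y)) = (decide (x < y)) := by
  simp only [decide_eq_decide]; exact hf x hx y hy

lemma pyTupLt_map {t : List Int} {f : Int → Int}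
    (hf : ∀ x ∈ t, ∀ y ∈ t, (f x < f y ↔ x < y)) :
    ∀ (xs ys : List Int), (∀ x ∈ xs, x ∈ t) → (∀ y ∈ ys, y ∈ t) →
      pyTupLt (xs.map f) (ys.map f) = pyTupLt xs ys := by
  intro xs
  induction xs with
  | nil => intro ys _ _; cases ys <;> rfl
  | cons x xs ih =>
    intro ys hxs hys
    cases ys with
    | nil => rfl
    | cons y ys' =>
      have hx : x ∈ t := hxs x List.mem_cons_self
      have hy : y ∈ t := hys y List.mem_cons_self
      simp only [List.map, pyTupLt]
      rw [ordpres_declt hf hx hy, ordpres_beq hf hx hy,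
          ih ys' (fun z hz => hxs z (List.mem_cons_of_mem _ hz))
                 (fun z hz => hys z (List.mem_cons_of_mem _ hz))]

-- ---- the A-side rotation step commutes with relabeling ------------------------

lemma rotA_map (f : Int → Int) (l : List Int) :
    PySem.List.slice (l.map f) (some 1) (some 4) ++ PySem.List.slice (l.map f) (some 0) (some 1)
      = (PySem.List.slice l (some 1) (some 4) ++ PySem.List.slice l (some 0) (some 1)).map f := by
  simp [PySem.List.slice, PySem.List.clampIdx, List.map_take, List.map_drop]

lemma rotA_subset (l : List Int) :
    ∀ x ∈ PySem.List.slice l (some 1) (some 4) ++ PySem.List.slice l (some 0) (some 1), x ∈ l := by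
  intro x hx
  simp only [PySem.List.slice, PySem.List.clampIdx, List.mem_append] at hx
  rcases hx with hx | hx
  · exact List.mem_of_mem_drop (List.mem_of_mem_take hx)
  · exact List.mem_of_mem_drop (List.mem_of_mem_take hx)

lemma A_fold {t : List Int} {f : Int → Int}
    (hf : ∀ x ∈ t, ∀ y ∈ t, (f x < f y ↔ x < y)) :
    ∀ (cnts : List Int) (s rot : List Int) (rt : Int),
      (∀ x ∈ s, x ∈ t) → (∀ x ∈ rot, x ∈ t) →
      (cnts.foldl
        (fun (st : List Int × List Int × Int) rotation_cnt =>
          let rotated := PySem.List.slice st.2.1 (some 1) (some 4) ++ PySem.List.slice st.2.1 (some 0) (some 1)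
          if pyTupLt rotated st.1 then (rotated, rotated, rotation_cnt) else (st.1, rotated, st.2.2))
        (s.map f, rot.map f, rt)).2.2
      = (cnts.foldl
        (fun (st : List Int × List Int × Int) rotation_cnt =>
          let rotated := PySem.List.slice st.2.1 (some 1) (some 4) ++ PySem.List.slice st.2.1 (some 0) (some 1)
          if pyTupLt rotated st.1 then (rotated, rotated, rotation_cnt) else (st.1, rotated, st.2.2))
        (s, rot, rt)).2.2 := by
  intro cnts
  induction cnts with
  | nil => intro s rot rt _ _; rfl
  | cons c cs ih =>
    intro s rot rt hs hrot
    simp only [List.foldl]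
    rw [rotA_map f rot]
    set rotated := PySem.List.slice rot (some 1) (some 4) ++ PySem.List.slice rot (some 0) (some 1) with hrotdef
    have hrsub : ∀ x ∈ rotated, x ∈ t := fun x hx => hrot x (rotA_subset rot x hx)
    rw [pyTupLt_map hf rotated s hrsub hs]
    by_cases hcond : pyTupLt rotated s = true
    · rw [if_pos hcond, if_pos hcond]
      exact ih rotated rotated c hrsub hrsub
    · rw [if_neg hcond, if_neg hcond]
      exact ih s rotated rt hs hrsub

lemma canon_map {t : List Int} {f : Int → Int}
    (hf : ∀ x ∈ t, ∀ y ∈ t, (f x < f y ↔ x < y)) :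
    (canonicalize_neighbours (t.map f)).2 = (canonicalize_neighbours t).2 := by
  simp only [canonicalize_neighbours]
  exact A_fold hf (PySem.List.pyRange 1 4 1) t t 0 (fun x hx => hx) (fun x hx => hx)

-- ---- pyIntMin under relabeling ------------------------------------------------

lemma minFold_mem : ∀ (l : List Int) (acc : Int),
    l.foldl (fun m x => if x < m then x else m) acc ∈ acc :: l := by
  intro l
  induction l with
  | nil => intro acc; simp
  | cons y l ih =>
    intro acc
    simp only [List.foldl]
    have := ih (if y < acc then y else acc)
    rcases List.mem_cons.mp this with h | h
    · rw [h]; split_ifs <;> simp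
    · simp [h]

lemma pyIntMin_mem (x : Int) (l : List Int) : pyIntMin (x :: l) ∈ x :: l :=
  minFold_mem l x

lemma minFold_map {t : List Int} {f : Int → Int}
    (hf : ∀ x ∈ t, ∀ y ∈ t, (f x < f y ↔ x < y)) :
    ∀ (l : List Int) (acc : Int), acc ∈ t → (∀ z ∈ l, z ∈ t) →
      (l.map f).foldl (fun m x => if x < m then x else m) (f acc)
        = f (l.foldl (fun m x => if x < m then x else m) acc) := by
  intro l
  induction l with
  | nil => intro acc _ _; rfl
  | cons y l ih =>
    intro acc hacc hl
    have hy : y ∈ t := hl y List.mem_cons_self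
    simp only [List.map, List.foldl]
    have hstep : (if f y < f acc then f y else f acc) = f (if y < acc then y else acc) := by
      by_cases h : y < acc
      · rw [if_pos ((hf y hy acc hacc).mpr h), if_pos h]
      · rw [if_neg (fun hc => h ((hf y hy acc hacc).mp hc)), if_neg h]
    rw [hstep]
    exact ih _ (by split_ifs <;> assumption) (fun z hz => hl z (List.mem_cons_of_mem _ hz))

lemma pyIntMin_map {t : List Int} {f : Int → Int}
    (hf : ∀ x ∈ t, ∀ y ∈ t, (f x < f y ↔ x < y))
    (x : Int) (l : List Int) (hx : x ∈ t) (hl : ∀ z ∈ l, z ∈ t) :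
    pyIntMin ((x :: l).map f) = f (pyIntMin (x :: l)) := by
  simp only [List.map, pyIntMin]
  exact minFold_map hf l x hx hl

-- ---- the B-side refinement under relabeling -----------------------------------

lemma getD_map_lt (f : Int → Int) (t : List Int) (i : Nat) (h : i < t.length) :
    (t.map f).getD i 0 = f (t.getD i 0) := by
  rw [List.getD_eq_getElem _ _ (by simp [h] : i < (t.map f).length),
      List.getD_eq_getElem _ _ h, List.getElem_map]

lemma getD_mem (t : List Int) (i : Nat) (h : i < t.length) : t.getD i 0 ∈ t := by
  rw [List.getD_eq_getElem _ _ h]; exact List.getElem_mem h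

lemma B_fold {t : List Int} {f : Int → Int}
    (hf : ∀ x ∈ t, ∀ y ∈ t, (f x < f y ↔ x < y)) (hn : 0 < t.length) :
    ∀ (l : List Nat) (cand : List Nat),
      l.foldl
        (fun cand depth =>
          if cand.length ≤ 1 then cand
          else
            let best := pyIntMin (cand.map (fun c => (t.map f).getD ((c + depth) % t.length) 0))
            cand.filter (fun c => (t.map f).getD ((c + depth) % t.length) 0 == best))
        cand
      = l.foldl
        (fun cand depth =>
          if cand.length ≤ 1 then cand
          else
            let best := pyIntMin (cand.map (fun c => t.getD ((c + depth) % t.length) 0))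
            cand.filter (fun c => t.getD ((c + depth) % t.length) 0 == best))
        cand := by
  intro l
  induction l with
  | nil => intro cand; rfl
  | cons d ds ih =>
    intro cand
    simp only [List.foldl]
    rw [ih]
    congr 1
    by_cases hlen : cand.length ≤ 1
    · rw [if_pos hlen, if_pos hlen]
    · rw [if_neg hlen, if_neg hlen]
      have hidx : ∀ c : Nat, (c + d) % t.length < t.length := fun c => Nat.mod_lt _ hn
      have hmapped : cand.map (fun c => (t.map f).getD ((c + d) % t.length) 0)
          = (cand.map (fun c => t.getD ((c + d) % t.length) 0)).map f := by
        rw [List.map_map]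
        exact List.map_congr_left (fun c _ => getD_map_lt f t _ (hidx c))
      cases hcand : cand with
      | nil => rw [hcand] at hlen; simp at hlen
      | cons c0 cs =>
        have hvals : ∀ z ∈ (c0 :: cs).map (fun c => t.getD ((c + d) % t.length) 0), z ∈ t := by
          intro z hz
          rcases List.mem_map.mp hz with ⟨c, _, rfl⟩
          exact getD_mem t _ (hidx c)
        rw [hcand] at hmapped
        simp only [List.map] at hmapped hvals ⊢
        rw [hmapped]
        rw [show (f (t.getD ((c0 + d) % t.length) 0) ::
              (cs.map (fun c => t.getD ((c + d) % t.length) 0)).map f)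
            = ((t.getD ((c0 + d) % t.length) 0 :: cs.map (fun c => t.getD ((c + d) % t.length) 0)).map f)
          from rfl]
        rw [pyIntMin_map hf _ _ (hvals _ List.mem_cons_self)
              (fun z hz => hvals z (List.mem_cons_of_mem _ hz))]
        apply List.filter_congr
        intro c hc
        rw [getD_map_lt f t _ (hidx c)]
        have hmem1 : t.getD ((c + d) % t.length) 0 ∈ t := getD_mem t _ (hidx c)
        have hmem2 : pyIntMin (t.getD ((c0 + d) % t.length) 0 :: cs.map (fun c => t.getD ((c + d) % t.length) 0)) ∈ t := by
          have := pyIntMin_mem (t.getD ((c0 + d) % t.length) 0) (cs.map (fun c => t.getD ((c + d) % t.length) 0))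
          exact hvals _ this
        exact ordpres_beq hf hmem1 hmem2

lemma bRot_map {t : List Int} {f : Int → Int}
    (hf : ∀ x ∈ t, ∀ y ∈ t, (f x < f y ↔ x < y)) :
    bRot (t.map f) = bRot t := by
  cases ht : t with
  | nil => rfl
  | cons a t' =>
    rw [← ht]
    have hn : 0 < t.length := by rw [ht]; simp
    simp only [bRot, List.length_map]
    rw [B_fold hf hn]

-- ---- the rank relabeling ------------------------------------------------------

def pvRank (t : List Int) (x : Int) : Int :=
  ((t.filter (fun y => decide (y < x))).length : Int)

lemma filter_len_mono (p q : Int → Bool) (h : ∀ z, p z = true → q z = true) :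
    ∀ (t : List Int), (t.filter p).length ≤ (t.filter q).length := by
  intro t
  induction t with
  | nil => simp
  | cons a t ih =>
    simp only [List.filter]
    cases hp : p a with
    | true => rw [h a hp]; simpa using ih
    | false => cases q a <;> simp <;> omega

lemma filter_len_strict {x y : Int} (hxy : x < y) :
    ∀ (t : List Int), x ∈ t →
      (t.filter (fun z => decide (z < x))).length < (t.filter (fun z => decide (z < y))).length := by
  intro t
  induction t with
  | nil => intro h; simp at h
  | cons a t ih =>
    intro hmem
    have hmono := filter_len_mono (fun z => decide (z < x)) (fun z => decide (z < y))
      (fun z hz => by simp at hz ⊢; omega) t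
    simp only [List.filter]
    by_cases hax : a < x
    · have hay : a < y := lt_trans hax hxy
      have hmem' : x ∈ t := by
        rcases List.mem_cons.mp hmem with h | h
        · omega
        · exact h
      simp only [decide_eq_true hax, decide_eq_true hay]
      simpa using ih hmem'
    · by_cases hay : a < y
      · simp only [decide_eq_false hax, decide_eq_true hay]
        simpa using Nat.lt_succ_of_le hmono
      · have hmem' : x ∈ t := by
          rcases List.mem_cons.mp hmem with h | h
          · omega
          · exact h
        simp only [decide_eq_false hax, decide_eq_false hay]
        exact ih hmem'

lemma pvRank_lt_iff (t : List Int) {x y : Int} (hx : x ∈ t) (_hy : y ∈ t) :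
    pvRank t x < pvRank t y ↔ x < y := by
  constructor
  · intro h
    by_contra hxy
    have hle : y ≤ x := by omega
    have := filter_len_mono (fun z => decide (z < y)) (fun z => decide (z < x))
      (fun z hz => by simp at hz ⊢; omega) t
    simp only [pvRank] at h
    omega
  · intro h
    have := filter_len_strict h t hx
    simp only [pvRank]
    omega

lemma filter_len_lt (p : Int → Bool) :
    ∀ (t : List Int), ∀ x ∈ t, p x = false → (t.filter p).length < t.length := by
  intro t
  induction t with
  | nil => intro x hx _; simp at hx
  | cons a t ih =>
    intro x hx hpx
    rw [List.filter_cons]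
    rcases List.mem_cons.mp hx with h | h
    · subst h
      simp only [hpx, Bool.false_eq_true, if_false, List.length_cons]
      have := List.length_filter_le p t
      omega
    · by_cases hpa : p a = true
      · have := ih x h hpx
        simp only [hpa, if_true, List.length_cons]
        omega
      · rw [if_neg hpa]
        simp only [List.length_cons]
        have := List.length_filter_le p t
        omega

lemma pvRank_bounds (t : List Int) {x : Int} (hx : x ∈ t) (ht : t.length ≤ 4) :
    0 ≤ pvRank t x ∧ pvRank t x < 4 := by
  have h1 : (t.filter (fun y => decide (y < x))).length < t.length :=
    filter_len_lt _ t x hx (by simp)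
  constructor
  · simp [pvRank]
  · simp only [pvRank]; omega

-- ---- the finite check on rank lists -------------------------------------------

lemma small_check : ∀ (r : List Int), r.length ≤ 4 → (∀ x ∈ r, 0 ≤ x ∧ x < 4) →
    (canonicalize_neighbours r).2 = ((bRot r : Nat) : Int) := by
  intro r hlen hb
  match r, hlen with
  | [], _ => decide
  | [a], _ =>
    obtain ⟨ha0, ha1⟩ := hb a (by simp)
    interval_cases a <;> decide
  | [a, b], _ =>
    obtain ⟨ha0, ha1⟩ := hb a (by simp)
    obtain ⟨hb0, hb1⟩ := hb b (by simp)
    interval_cases a <;> interval_cases b <;> decide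
  | [a, b, c], _ =>
    obtain ⟨ha0, ha1⟩ := hb a (by simp)
    obtain ⟨hb0, hb1⟩ := hb b (by simp)
    obtain ⟨hc0, hc1⟩ := hb c (by simp)
    interval_cases a <;> interval_cases b <;> interval_cases c <;> decide
  | [a, b, c, d], _ =>
    obtain ⟨ha0, ha1⟩ := hb a (by simp)
    obtain ⟨hb0, hb1⟩ := hb b (by simp)
    obtain ⟨hc0, hc1⟩ := hb c (by simp)
    obtain ⟨hd0, hd1⟩ := hb d (by simp)
    interval_cases a <;> interval_cases b <;> interval_cases c <;> interval_cases d <;> decide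
  | a :: b :: c :: d :: e :: rest, hlen => exfalso; simp at hlen; omega

-- ---- the two rotation counts agree on any prefix of length ≤ 4 ----------------

lemma rot_count_eq (t : List Int) (ht : t.length ≤ 4) :
    (canonicalize_neighbours t).2 = ((bRot t : Nat) : Int) := by
  have hf : ∀ x ∈ t, ∀ y ∈ t, (pvRank t x < pvRank t y ↔ x < y) :=
    fun x hx y hy => pvRank_lt_iff t hx hy
  have hA := canon_map hf
  have hB := bRot_map hf
  have hbounds : ∀ x ∈ t.map (pvRank t), 0 ≤ x ∧ x < 4 := by
    intro x hx
    rcases List.mem_map.mp hx with ⟨z, hz, rfl⟩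
    exact pvRank_bounds t hz ht
  have hsmall := small_check (t.map (pvRank t)) (by simpa using ht) hbounds
  rw [← hA, hsmall, hB]

-- ---- remaining glue -----------------------------------------------------------

lemma pvPrefix_len_le (fv : List Int) : (PySem.List.slice fv none (some 4)).length ≤ 4 := by
  simp [PySem.List.slice, PySem.List.clampIdx]

lemma bRot_lt (t : List Int) (h : t.length ≤ 4) : bRot t < 4 := by
  have key : ∀ (l : List Nat) (cand : List Nat), (∀ x ∈ cand, x < 4) →
      (List.foldl
        (fun cand depth =>
          if cand.length ≤ 1 then cand
          else
            let best := pyIntMin (cand.map (fun c => t.getD ((c + depth) % t.length) 0))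
            cand.filter (fun c => t.getD ((c + depth) % t.length) 0 == best))
        cand l).headD 0 < 4 := by
    intro l
    induction l with
    | nil =>
      intro cand hc
      cases cand with
      | nil => simp
      | cons y ys => exact hc y List.mem_cons_self
    | cons d ds ih =>
      intro cand hc
      simp only [List.foldl]
      apply ih
      intro x hx
      split at hx
      · exact hc x hx
      · exact hc x (List.mem_of_mem_filter hx)
  exact key (List.range t.length) (List.range t.length)
    (fun x hx => by have := List.mem_range.mp hx; omega)

-- the backward map fixes any string outside the four directions
lemma foldl_backward_fix (l : List Int) (a : String) (h : pvBackward a = a) :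
    l.foldl (fun x _ => pvBackward x) a = a := by
  induction l with
  | nil => rfl
  | cons x xs ih => simpa [List.foldl, h] using ih

-- undoing rc backward steps is the one modular shift along the cycle
lemma shift_eq (rc : Nat) (hrc : rc < 4) (action : String) (ha : action ∈ pvActionsCycle) :
    (PySem.List.pyRange 0 (rc : Int) 1).foldl (fun a _ => pvBackward a) action
      = pvActionsCycle.getD (((PySem.List.index? pvActionsCycle action).getD 0 + rc) % 4) "" := by
  interval_cases rc <;> fin_cases ha <;> decide

-- ===== VERDICT (by name: the statement is the Claim_ definition above) =====
theorem get_actual_move_before_rotation_spec : Claim_equal_get_actual_move_before_rotation := by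
  intro fv action hdom hpre
  unfold Spec_get_actual_move_before_rotation
  by_cases hb : action = "BOMB"
  · subst hb; simp [get_actual_move_before_rotation, get_actual_move_before_rotation_alt]
  by_cases hw : action = "WAIT"
  · subst hw; simp [get_actual_move_before_rotation, get_actual_move_before_rotation_alt]
  by_cases hc : action ∈ pvActionsCycle
  · have h := rot_count_eq (PySem.List.slice fv none (some 4)) (pvPrefix_len_le fv)
    have hlt := bRot_lt (PySem.List.slice fv none (some 4)) (pvPrefix_len_le fv)
    have hnb : (action = "BOMB" || action = "WAIT") = false := by
      simp [pvActionsCycle] at hc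
      rcases hc with rfl | rfl | rfl | rfl <;> decide
    have hcont : pvActionsCycle.contains action = true := List.elem_eq_true_of_mem hc
    simp only [get_actual_move_before_rotation, get_actual_move_before_rotation_alt,
      hnb, hcont, Bool.false_eq_true, if_false, Bool.not_true, Bool.false_eq_true]
    rw [h]
    exact shift_eq (bRot (PySem.List.slice fv none (some 4))) hlt action hc
  · have hfix : pvBackward action = action := by
      simp [pvActionsCycle] at hc
      simp [pvBackward, hc.1, hc.2.1, hc.2.2.1, hc.2.2.2]
    simp [get_actual_move_before_rotation, get_actual_move_before_rotation_alt, hb, hw, hc,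
          foldl_backward_fix _ _ hfix]
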